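-- pv_equiv track=rewrite | github.com/lanlanabcd/atis | prac.py | create_xor_instance_batches
-- ===== SOURCE A (Python) =====
-- def create_xor_instance_batches(num_rounds=2000):
--     questions = []
--     answers = []
--     for round in range(num_rounds):
--         for x1 in range(2):
--             for x2 in range(2):
--                 answer = 0 if x1 == x2 else 1
--                 questions.append(((x1, x2), (x1, x2)))
--                 answers.append((answer, answer))
--     return questions, answers
-- ===== SOURCE B (Python) =====
-- def create_xor_instance_batches(num_rounds=2000):
--     questions = [((0, 0), (0, 0)), ((0, 1), (0, 1)), ((1, 0), (1, 0)), ((1, 1), (1, 1))] * num_rounds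
--     answers = [(0, 0), (1, 1), (1, 1), (0, 0)] * num_rounds
--     return questions, answers
-- ===== Notes on version B (the rewrite author's own statement) =====
-- stated objective: simpler
-- what changed: Replaces the triple nested loop with per-element appends by a literal four-entry round template replicated with list multiplication.
import Mathlib
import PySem

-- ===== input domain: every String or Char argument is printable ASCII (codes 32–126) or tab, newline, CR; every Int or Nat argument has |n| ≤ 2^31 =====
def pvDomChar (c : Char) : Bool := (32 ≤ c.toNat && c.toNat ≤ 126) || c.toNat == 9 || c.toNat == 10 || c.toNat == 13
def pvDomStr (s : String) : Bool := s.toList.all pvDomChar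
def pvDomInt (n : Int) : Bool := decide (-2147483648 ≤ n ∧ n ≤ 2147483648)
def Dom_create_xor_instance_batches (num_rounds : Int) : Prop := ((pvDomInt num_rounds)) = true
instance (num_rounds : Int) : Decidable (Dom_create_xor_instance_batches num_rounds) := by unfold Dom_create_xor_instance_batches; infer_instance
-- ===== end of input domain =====

-- ===== PORT A =====
-- Header: B replaces the nested loops by a literal round template replicated (list multiplication); objective: simpler.
def create_xor_instance_batches (num_rounds : Int) : (List ((Int × Int) × (Int × Int))) × (List (Int × Int)) :=
  (PySem.List.pyRange 0 num_rounds 1).foldl (fun qa _round =>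
    (PySem.List.pyRange 0 2 1).foldl (fun qa x1 =>
      (PySem.List.pyRange 0 2 1).foldl (fun qa x2 =>
        let answer : Int := if x1 == x2 then 0 else 1
        (qa.1 ++ [((x1, x2), (x1, x2))], qa.2 ++ [(answer, answer)])) qa) qa)
    (([] : List ((Int × Int) × (Int × Int))), ([] : List (Int × Int)))

-- ===== PORT B =====
def create_xor_instance_batches_alt (num_rounds : Int) : (List ((Int × Int) × (Int × Int))) × (List (Int × Int)) :=
  -- Python list * int: concatenate max(n,0) copies of the literal template.
  ((List.replicate num_rounds.toNat
      [(((0:Int),(0:Int)),((0:Int),(0:Int))), ((0,1),(0,1)), ((1,0),(1,0)), ((1,1),(1,1))]).flatten,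
   (List.replicate num_rounds.toNat
      [((0:Int),(0:Int)), (1,1), (1,1), (0,0)]).flatten)

-- ===== PRECONDITION & SPEC =====
def Spec_create_xor_instance_batches (num_rounds : Int) (out : (List ((Int × Int) × (Int × Int))) × (List (Int × Int))) : Prop := out = create_xor_instance_batches_alt num_rounds
instance (num_rounds : Int) (out : (List ((Int × Int) × (Int × Int))) × (List (Int × Int))) : Decidable (Spec_create_xor_instance_batches num_rounds out) := by unfold Spec_create_xor_instance_batches; infer_instance

-- ===== CLAIM (what is proved, stated in full; the proofs are below) =====
def Claim_equal_create_xor_instance_batches : Prop := ∀ (num_rounds : Int), Dom_create_xor_instance_batches num_rounds → Spec_create_xor_instance_batches num_rounds (create_xor_instance_batches num_rounds)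

-- ===== LEMMAS AND PROOFS =====

-- ===== VERDICT (by name: the statement is the Claim_ definition above) =====
-- one round of A's inner loops appends exactly the template block
lemma pvRound (qa : (List ((Int × Int) × (Int × Int))) × (List (Int × Int))) :
    ((PySem.List.pyRange 0 2 1).foldl (fun qa x1 =>
      (PySem.List.pyRange 0 2 1).foldl (fun qa x2 =>
        let answer : Int := if x1 == x2 then 0 else 1
        (qa.1 ++ [((x1, x2), (x1, x2))], qa.2 ++ [(answer, answer)])) qa) qa)
    = (qa.1 ++ [(((0:Int),(0:Int)),((0:Int),(0:Int))), ((0,1),(0,1)), ((1,0),(1,0)), ((1,1),(1,1))],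
       qa.2 ++ [((0:Int),(0:Int)), (1,1), (1,1), (0,0)]) := by
  obtain ⟨q, a⟩ := qa
  simp [PySem.List.pyRange, List.range_succ]

lemma pvFold (l : List Int) : ∀ (q : List ((Int × Int) × (Int × Int))) (a : List (Int × Int)),
    l.foldl (fun qa _round =>
      (PySem.List.pyRange 0 2 1).foldl (fun qa x1 =>
        (PySem.List.pyRange 0 2 1).foldl (fun qa x2 =>
          let answer : Int := if x1 == x2 then 0 else 1
          (qa.1 ++ [((x1, x2), (x1, x2))], qa.2 ++ [(answer, answer)])) qa) qa) (q, a)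
    = (q ++ (List.replicate l.length
        [(((0:Int),(0:Int)),((0:Int),(0:Int))), ((0,1),(0,1)), ((1,0),(1,0)), ((1,1),(1,1))]).flatten,
       a ++ (List.replicate l.length [((0:Int),(0:Int)), (1,1), (1,1), (0,0)]).flatten) := by
  induction l with
  | nil => simp
  | cons x l ih =>
    intro q a
    rw [List.foldl_cons, pvRound, ih]
    simp [List.replicate_succ]

theorem create_xor_instance_batches_spec : Claim_equal_create_xor_instance_batches := by
  intro n _
  unfold Spec_create_xor_instance_batches create_xor_instance_batches create_xor_instance_batches_alt
  rw [pvFold]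
  simp [PySem.List.length_pyRange_one]
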